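-- pv_equiv track=rewrite | github.com/joselo-ai/roostr-research | command-center/update-accountability-data.py | calculate_token_costs
-- ===== SOURCE A (Python) =====
-- def calculate_token_costs(activity_entries):
--     """Calculate token usage from activity log"""
--     # Mock calculation - replace with real session history API
--     total_tokens = 0
--     by_category = {}
--
--     for entry in activity_entries:
--         category = entry.get('category', 'unknown')
--         # Estimate tokens based on activity (rough heuristic)
--         tokens = 1000  # Default estimate
--
--         if 'trading' in category:
--             tokens = 500
--         elif 'research' in category:
--             tokens = 3000
--         elif 'marketing' in category:
--             tokens = 1500
--
--         total_tokens += tokens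
--         by_category[category] = by_category.get(category, 0) + tokens
--
--     return total_tokens, by_category
-- ===== SOURCE B (Python) =====
-- def calculate_token_costs(activity_entries):
--     """Calculate token usage from activity log"""
--     # Count entries per category in one pass (first-appearance order),
--     # then apply the token heuristic once per distinct category.
--     counts = {}
--     for entry in activity_entries:
--         cat = entry.get('category', 'unknown')
--         counts[cat] = counts.get(cat, 0) + 1
--
--     def value(cat):
--         if 'trading' in cat:
--             return 500
--         if 'research' in cat:
--             return 3000
--         if 'marketing' in cat:
--             return 1500
--         return 1000
--
--     by_category = {cat: n * value(cat) for cat, n in counts.items()}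
--     return sum(by_category.values()), by_category
-- ===== Notes on version B (the rewrite author's own statement) =====
-- stated objective: alternative
-- what changed: B first builds a frequency table of categories in one pass, then applies the substring heuristic once per distinct category, computing by_category[cat] = count * value and the total as the sum of those values, instead of A's per-entry heuristic and running accumulation.
import Mathlib
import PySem

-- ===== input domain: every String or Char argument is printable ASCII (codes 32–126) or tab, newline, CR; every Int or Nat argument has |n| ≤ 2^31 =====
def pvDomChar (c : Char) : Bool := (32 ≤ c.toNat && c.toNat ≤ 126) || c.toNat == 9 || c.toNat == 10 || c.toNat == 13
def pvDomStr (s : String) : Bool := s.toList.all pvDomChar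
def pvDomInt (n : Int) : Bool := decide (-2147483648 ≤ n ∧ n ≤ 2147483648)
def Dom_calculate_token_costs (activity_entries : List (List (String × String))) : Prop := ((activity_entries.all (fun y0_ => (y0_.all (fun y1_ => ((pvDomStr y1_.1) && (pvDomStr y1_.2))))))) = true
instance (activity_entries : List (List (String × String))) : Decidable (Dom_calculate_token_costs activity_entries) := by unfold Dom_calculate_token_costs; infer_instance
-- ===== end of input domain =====

-- B changes the decomposition: one counting pass over entries, then the token heuristic applied once
-- per distinct category (objective: alternative; same result, heuristic evaluated k instead of n times).

-- ===== PORT A =====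
-- A: one loop per entry, accumulating total and a running by_category dict.
def calculate_token_costs (activity_entries : List (List (String × String))) : Int × (List (String × Int)) :=
  let r := activity_entries.foldl
    (fun (st : Int × PySem.Dict String Int) entry =>
      let category := (PySem.Dict.mk entry).getD "category" "unknown"
      let tokens : Int :=
        if PySem.Str.isIn "trading" category then 500
        else if PySem.Str.isIn "research" category then 3000
        else if PySem.Str.isIn "marketing" category then 1500
        else 1000
      (st.1 + tokens, st.2.modify category 0 (· + tokens)))
    (0, PySem.Dict.empty)
  (r.1, r.2.items)

-- ===== PORT B =====
def tokB (cat : String) : Int :=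
  if PySem.Str.isIn "trading" cat then 500
  else if PySem.Str.isIn "research" cat then 3000
  else if PySem.Str.isIn "marketing" cat then 1500
  else 1000

-- B: count categories first, then apply the heuristic once per distinct category.
def calculate_token_costs_alt (activity_entries : List (List (String × String))) : Int × (List (String × Int)) :=
  let counts := activity_entries.foldl
    (fun (d : PySem.Dict String Int) entry =>
      d.modify ((PySem.Dict.mk entry).getD "category" "unknown") 0 (· + 1))
    PySem.Dict.empty
  let by_category := counts.items.map (fun p => (p.1, p.2 * tokB p.1))
  ((by_category.map (·.2)).sum, by_category)

-- ===== PRECONDITION & SPEC =====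
def Spec_calculate_token_costs (activity_entries : List (List (String × String))) (out : Int × (List (String × Int))) : Prop := out = calculate_token_costs_alt activity_entries
instance (activity_entries : List (List (String × String))) (out : Int × (List (String × Int))) : Decidable (Spec_calculate_token_costs activity_entries out) := by unfold Spec_calculate_token_costs; infer_instance

-- ===== CLAIM (what is proved, stated in full; the proofs are below) =====
def Claim_equal_calculate_token_costs : Prop := ∀ (activity_entries : List (List (String × String))), Dom_calculate_token_costs activity_entries → Spec_calculate_token_costs activity_entries (calculate_token_costs activity_entries)

-- ===== LEMMAS AND PROOFS =====

def pvCat (entry : List (String × String)) : String :=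
  (PySem.Dict.mk entry).getD "category" "unknown"

-- A's pair-fold splits into the token sum and the dict fold.
theorem pv_foldA (l : List String) (t : Int) (d : PySem.Dict String Int) :
    l.foldl (fun (st : Int × PySem.Dict String Int) c =>
        (st.1 + tokB c, st.2.modify c 0 (· + tokB c))) (t, d)
      = (t + (l.map tokB).sum, l.foldl (fun d c => d.modify c 0 (· + tokB c)) d) := by
  induction l generalizing t d with
  | nil => simp
  | cons x xs ih => simp [ih]; ring

-- lookup in A's dict fold: default plus count * token value
theorem pv_getD_fold (l : List String) (d : PySem.Dict String Int) (c : String) :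
    (l.foldl (fun d x => d.modify x 0 (· + tokB x)) d).getD c 0
      = d.getD c 0 + (l.count c : Int) * tokB c := by
  induction l generalizing d with
  | nil => simp
  | cons x xs ih =>
    simp only [List.foldl_cons, ih, List.count_cons]
    by_cases h : c = x
    · subst h
      rw [PySem.Dict.getD_modify_self]
      simp
      ring
    · rw [PySem.Dict.getD_modify_of_ne _ _ _ h]
      simp [Ne.symm h]

theorem pv_single_sum (s : List String) (x : String) (hnd : s.Nodup) (hx : x ∈ s) :
    (s.map (fun k => if k = x then tokB k else 0)).sum = tokB x := by
  induction s with
  | nil => cases hx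
  | cons y ys ih =>
    have hnd' := List.nodup_cons.mp hnd
    by_cases h : y = x
    · subst h
      have hz : (ys.map (fun k => if k = y then tokB k else 0)).sum = 0 := by
        apply List.sum_eq_zero
        intro z hz
        rcases List.mem_map.mp hz with ⟨k, hk, rfl⟩
        have hk' : ¬ k = y := fun e => hnd'.1 (e ▸ hk)
        simp [hk']
      simp [hz]
    · have hx' : x ∈ ys := by
        rcases List.mem_cons.mp hx with h' | h'
        · exact absurd h'.symm h
        · exact h'
      simp [h, ih hnd'.2 hx']

-- summing count * value over the distinct categories equals summing the value per entry
theorem pv_group_sum (l s : List String) (hnd : s.Nodup) (hsub : ∀ x ∈ l, x ∈ s) :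
    (s.map (fun k => (l.count k : Int) * tokB k)).sum = (l.map tokB).sum := by
  induction l with
  | nil => simp
  | cons x xs ih =>
    have hfe : (fun k => (((x :: xs).count k : Int)) * tokB k)
        = fun k => ((xs.count k : Int) * tokB k) + (if k = x then tokB k else 0) := by
      funext k
      rw [List.count_cons]
      by_cases h : k = x
      · simp [h]; ring
      · have hxk := Ne.symm h
        simp [h, hxk]
    rw [hfe, PySem.List.sum_map_add_int, ih (fun y hy => hsub y (List.mem_cons_of_mem _ hy)),
        pv_single_sum s x hnd (hsub x List.mem_cons_self)]
    simp only [List.map_cons, List.sum_cons]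
    ring

-- ===== VERDICT (by name: the statement is the Claim_ definition above) =====
theorem calculate_token_costs_spec : Claim_equal_calculate_token_costs := by
  intro es _
  simp only [Spec_calculate_token_costs, calculate_token_costs, calculate_token_costs_alt]
  have hA : es.foldl
      (fun (st : Int × PySem.Dict String Int) entry =>
        let category := (PySem.Dict.mk entry).getD "category" "unknown"
        let tokens : Int :=
          if PySem.Str.isIn "trading" category then 500
          else if PySem.Str.isIn "research" category then 3000
          else if PySem.Str.isIn "marketing" category then 1500
          else 1000
        (st.1 + tokens, st.2.modify category 0 (· + tokens)))
      (0, PySem.Dict.empty)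
      = (es.map pvCat).foldl
        (fun (st : Int × PySem.Dict String Int) c =>
          (st.1 + tokB c, st.2.modify c 0 (· + tokB c))) (0, PySem.Dict.empty) := by
    rw [List.foldl_map]
    rfl
  have hB : es.foldl
      (fun (d : PySem.Dict String Int) entry =>
        d.modify ((PySem.Dict.mk entry).getD "category" "unknown") 0 (· + 1))
      PySem.Dict.empty = PySem.Dict.counter (es.map pvCat) := by
    rw [PySem.Dict.counter_eq_foldl, List.foldl_map]
    rfl
  set cats := es.map pvCat with hcats
  rw [hA, hB, pv_foldA, PySem.Dict.items_counter]
  set dA := cats.foldl (fun d c => d.modify c 0 (· + tokB c)) PySem.Dict.empty with hdA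
  have hkeys : dA.keys = PySem.Set.ofList cats := by
    rw [hdA]
    have := PySem.Dict.keys_foldl_modify_key cats (fun c => c) 0
      (fun _ c => (· + tokB c)) PySem.Dict.empty
    simpa [PySem.Set.update_nil_left] using this
  have hnd : dA.keys.Nodup := by
    rw [hdA]
    exact PySem.Dict.nodup_keys_foldl_modify_key cats (fun c => c) 0
      (fun _ c => (· + tokB c)) PySem.Dict.empty (by simp)
  have hitems : dA.items = (PySem.Set.ofList cats).map (fun k => (k, (cats.count k : Int) * tokB k)) := by
    rw [PySem.Dict.items_eq_map_keys dA hnd 0, hkeys]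
    apply List.map_congr_left
    intro k _
    rw [hdA, pv_getD_fold]
    simp
  rw [hitems]
  have hsum := pv_group_sum cats (PySem.Set.ofList cats) (PySem.Set.nodup_ofList cats)
    (fun x hx => (PySem.Set.mem_ofList cats x).mpr hx)
  simp only [hcats, List.map_map, Function.comp_def, zero_add] at hsum ⊢
  rw [hsum]
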